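-- pv_equiv track=rewrite | github.com/joannalew/CTCI | Python/ctci1-5.py | replace_spaces2
-- ===== SOURCE A (Python) =====
-- def replace_spaces2(s):
-- 	replaced = True
--
-- 	while replaced:
-- 		replaced = False
-- 		old = len(s)
-- 		s = s.replace(' ', '%20')
-- 		if len(s) != old:
-- 			replaced = True
--
-- 	return s
-- ===== SOURCE B (Python) =====
-- def replace_spaces2(s):
--     return ''.join('%20' if c == ' ' else c for c in s)
-- ===== Notes on version B (the rewrite author's own statement) =====
-- stated objective: idiomatic
-- what changed: B replaces A's replace-and-re-measure while-loop with a single character-by-character pass that emits '%20' for each space and joins the pieces.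
import Mathlib
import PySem

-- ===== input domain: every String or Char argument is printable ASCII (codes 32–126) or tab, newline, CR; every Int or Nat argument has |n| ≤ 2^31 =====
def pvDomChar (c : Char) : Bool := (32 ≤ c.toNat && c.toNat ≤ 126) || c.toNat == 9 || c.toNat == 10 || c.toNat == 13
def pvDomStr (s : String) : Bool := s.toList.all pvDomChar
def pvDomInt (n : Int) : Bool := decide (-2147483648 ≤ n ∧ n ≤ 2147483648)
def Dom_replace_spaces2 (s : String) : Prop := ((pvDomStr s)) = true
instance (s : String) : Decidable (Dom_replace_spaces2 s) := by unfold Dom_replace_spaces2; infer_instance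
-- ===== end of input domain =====

-- B replaces A's replace-and-re-measure while-loop with a single char-by-char pass (idiomatic join).

-- ===== PORT A =====
-- A's while loop: repeat s = s.replace(' ', '%20') until the length stops changing.

-- expansion of one character under ' ' -> "%20" (used only for the termination measure and proofs)
def pvExpand (c : Char) : List Char := if c = ' ' then ['%', '2', '0'] else [c]

theorem pvReplace_go_spec (new : List Char) (l : List Char) :
    ∀ (fuel : Nat) (acc : List Char), l.length ≤ fuel →
      PySem.Chars.replace.go [' '] new fuel l acc =
        acc.reverse ++ l.flatMap (fun c => if c = ' ' then new else [c]) := by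
  induction l with
  | nil =>
    intro fuel acc _
    cases fuel <;> simp [PySem.Chars.replace.go]
  | cons c t ih =>
    intro fuel acc hle
    cases fuel with
    | zero => simp at hle
    | succ n =>
      simp only [PySem.Chars.replace.go]
      by_cases hc : c = ' '
      · subst hc
        have hpre : [' '].isPrefixOf (' ' :: t) = true := by simp [List.isPrefixOf]
        rw [if_pos hpre]
        have := ih n (new.reverse ++ acc) (by simpa using Nat.le_of_succ_le_succ hle)
        simpa [List.flatMap_cons] using this
      · have hpre : [' '].isPrefixOf (c :: t) = false := by
          simp [List.isPrefixOf]
          exact fun h => hc h.symm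
        rw [hpre]
        simp only [Bool.false_eq_true, if_false]
        have := ih n (c :: acc) (by simpa using Nat.le_of_succ_le_succ hle)
        simpa [List.flatMap_cons, hc] using this

theorem pvReplaceChars_spec (l : List Char) :
    PySem.Chars.replace l [' '] ['%', '2', '0'] = l.flatMap pvExpand := by
  unfold PySem.Chars.replace
  rw [if_neg (by simp)]
  have := pvReplace_go_spec (['%', '2', '0']) l l.length [] (le_refl _)
  simpa [pvExpand] using this

theorem pvReplace_spec (s : String) :
    (PySem.Str.replace s " " "%20").toList = s.toList.flatMap pvExpand := by
  rw [PySem.Str.toList_replace]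
  exact pvReplaceChars_spec s.toList

theorem pvLen_flatMap (l : List Char) :
    (l.flatMap pvExpand).length = l.length + 2 * l.count ' ' := by
  induction l with
  | nil => simp
  | cons c t ih =>
    by_cases hc : c = ' ' <;> simp [pvExpand, hc, ih] <;> omega

theorem pvCount_flatMap (l : List Char) :
    (l.flatMap pvExpand).count ' ' = 0 := by
  induction l with
  | nil => simp
  | cons c t ih =>
    by_cases hc : c = ' ' <;> simp [pvExpand, hc, ih]

def replace_spaces2 (s : String) : String :=
  -- one iteration of A's while-body; recurse exactly when `replaced` would be set
  let old := PySem.Str.len s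
  let s' := PySem.Str.replace s " " "%20"
  if PySem.Str.len s' ≠ old then replace_spaces2 s' else s'
termination_by s.toList.count ' '
decreasing_by
  rename_i hne
  have hrw : (PySem.Str.replace s " " "%20").toList = s.toList.flatMap pvExpand := pvReplace_spec s
  rw [hrw, pvCount_flatMap]
  apply Nat.pos_of_ne_zero
  intro hz
  apply hne
  show PySem.Str.len (PySem.Str.replace s " " "%20") = PySem.Str.len s
  simp only [PySem.Str.len, hrw, pvLen_flatMap, hz]
  omega

-- ===== PORT B =====
def replace_spaces2_alt (s : String) : String :=
  PySem.Str.join "" (s.toList.map (fun c => if c == ' ' then "%20" else String.ofList [c]))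

-- ===== PRECONDITION & SPEC =====
def Spec_replace_spaces2 (s : String) (out : String) : Prop := out = replace_spaces2_alt s
instance (s : String) (out : String) : Decidable (Spec_replace_spaces2 s out) := by unfold Spec_replace_spaces2; infer_instance

-- ===== CLAIM (what is proved, stated in full; the proofs are below) =====
def Claim_equal_replace_spaces2 : Prop := ∀ (s : String), Dom_replace_spaces2 s → Spec_replace_spaces2 s (replace_spaces2 s)

-- ===== LEMMAS AND PROOFS =====

theorem pvNoSpace_expand (l : List Char) (h : l.count ' ' = 0) :
    l.flatMap pvExpand = l := by
  induction l with
  | nil => simp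
  | cons c t ih =>
    rw [List.count_cons] at h
    by_cases hc : c = ' '
    · simp [hc] at h
    · simp [pvExpand, hc] at h ⊢
      exact ih h

theorem pvJoinNil_flatten (parts : List (List Char)) :
    PySem.Chars.join [] parts = parts.flatten := by
  induction parts with
  | nil => simp [PySem.Chars.join_nil]
  | cons p rest ih =>
    cases rest with
    | nil => simp [PySem.Chars.join, List.intercalate]
    | cons q r => rw [PySem.Chars.join_cons_cons]; simp [ih]

theorem pvAlt_toList (s : String) :
    (replace_spaces2_alt s).toList = s.toList.flatMap pvExpand := by
  unfold replace_spaces2_alt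
  rw [PySem.Str.toList_join]
  have h : ("".toList) = ([] : List Char) := rfl
  rw [h, List.map_map, pvJoinNil_flatten]
  induction s.toList with
  | nil => simp
  | cons c t ih =>
    by_cases hc : c = ' ' <;>
      simp_all [pvExpand, Function.comp]

theorem pvA_toList (s : String) :
    (replace_spaces2 s).toList = s.toList.flatMap pvExpand := by
  rw [replace_spaces2.eq_def]
  set s' := PySem.Str.replace s " " "%20" with hs'
  by_cases h : PySem.Str.len s' ≠ PySem.Str.len s
  · rw [if_pos h]
    -- second iteration: s' has no spaces, so its replace is itself and the loop stops
    rw [replace_spaces2.eq_def]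
    have hc : s'.toList.count ' ' = 0 := by
      rw [hs', pvReplace_spec]; exact pvCount_flatMap _
    have hfix : (PySem.Str.replace s' " " "%20").toList = s'.toList := by
      rw [pvReplace_spec]; exact pvNoSpace_expand _ hc
    have hlen : PySem.Str.len (PySem.Str.replace s' " " "%20") = PySem.Str.len s' := by
      simp only [PySem.Str.len, hfix]
    rw [if_neg (by simpa using hlen)]
    rw [hfix]
    exact pvReplace_spec s
  · rw [if_neg h]
    exact pvReplace_spec s

-- ===== VERDICT (by name: the statement is the Claim_ definition above) =====
theorem replace_spaces2_spec : Claim_equal_replace_spaces2 := by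
  intro s _
  unfold Spec_replace_spaces2
  rw [← String.toList_inj, pvA_toList, pvAlt_toList]
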